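-- pv_equiv track=rewrite | github.com/ItIsMeMarin/codewars_kata | bishop_movment.py | check_if_on_diag
-- ===== SOURCE A (Python) =====
-- letters_position = ['a', 'b', 'c', 'd', 'e', 'f', 'g', 'h']
--
-- number_position = ['1','2','3','4','5','6','7','8']
--
-- def check_if_on_diag(start_pos, end_pos):
--     all_diag_postions = []
--
--     letter_index = letters_position.index(start_pos[0])
--     number_index = number_position.index(start_pos[1])
--     step = 1
--
--     for _ in range(7):
--
--         if not(letter_index - step < 0 or number_index + step > 7):
--             top_left = letters_position[letter_index - step] + number_position[number_index+ step]
--             all_diag_postions.append(top_left)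
--         if not(letter_index - step < 0 or number_index - step < 0):
--             bottom_left = letters_position[letter_index - step] + number_position[number_index -step]
--             all_diag_postions.append(bottom_left)
--         if not(letter_index + step > 7 or number_index + step > 7):
--             top_right =  letters_position[letter_index + step] + number_position[number_index + step]
--             all_diag_postions.append(top_right)
--         if not(letter_index + step > 7 or number_index - step < 0):
--             bottom_right = letters_position[letter_index + step] + number_position[number_index - step]
--             all_diag_postions.append(bottom_right)
--
--         step += 1
--
--     return end_pos in all_diag_postions
-- ===== SOURCE B (Python) =====
-- letters_position = ['a', 'b', 'c', 'd', 'e', 'f', 'g', 'h']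
--
-- number_position = ['1','2','3','4','5','6','7','8']
--
-- def check_if_on_diag(start_pos, end_pos):
--     li = letters_position.index(start_pos[0])
--     ni = number_position.index(start_pos[1])
--     if len(end_pos) != 2 or end_pos[0] not in letters_position or end_pos[1] not in number_position:
--         return False
--     le = letters_position.index(end_pos[0])
--     ne = number_position.index(end_pos[1])
--     return abs(le - li) == abs(ne - ni) and (le, ne) != (li, ni)
-- ===== Notes on version B (the rewrite author's own statement) =====
-- stated objective: simpler
-- what changed: B replaces A's loop that enumerates every diagonal square into a list followed by a membership scan with a direct closed-form test abs(le-li)==abs(ne-ni) (excluding the start square) on coordinates parsed once, after guarding that end_pos is a valid 2-character board square.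
import Mathlib
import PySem

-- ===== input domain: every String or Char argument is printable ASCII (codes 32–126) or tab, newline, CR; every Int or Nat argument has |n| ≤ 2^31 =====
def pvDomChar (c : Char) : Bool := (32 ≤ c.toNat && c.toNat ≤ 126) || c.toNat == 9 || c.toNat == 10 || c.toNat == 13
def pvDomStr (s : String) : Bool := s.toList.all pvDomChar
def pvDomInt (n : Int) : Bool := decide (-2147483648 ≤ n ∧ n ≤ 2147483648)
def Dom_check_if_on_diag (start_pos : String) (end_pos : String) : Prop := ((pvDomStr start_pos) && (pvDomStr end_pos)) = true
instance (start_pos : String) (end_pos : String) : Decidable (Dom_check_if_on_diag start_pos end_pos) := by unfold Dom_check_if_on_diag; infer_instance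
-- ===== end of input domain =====

-- B replaces A's enumeration of every diagonal square followed by a membership scan
-- with a closed-form |Δfile| == |Δrank| test on the parsed coordinates (objective: simpler).

-- ===== PORT A =====
-- Python strings are ported through List Char (squares are 2-char strings).
def pvLetters : List Char := ['a', 'b', 'c', 'd', 'e', 'f', 'g', 'h']
def pvNumbers : List Char := ['1', '2', '3', '4', '5', '6', '7', '8']

-- letters_position[i] + number_position[j] (guards in A keep i, j in range; default is irrelevant)
def pvSq (i j : Int) : List Char :=
  [PySem.List.pyGetD pvLetters i ' ', PySem.List.pyGetD pvNumbers j ' ']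

-- the loop of A: state = (all_diag_postions, step), 7 iterations
def pvDiag (letter_index number_index : Int) : List (List Char) :=
  ((PySem.List.pyRange 0 7 1).foldl (fun (st : List (List Char) × Int) _ =>
    let acc := st.1
    let step := st.2
    let acc := if !(letter_index - step < 0 || number_index + step > 7) then
                 acc ++ [pvSq (letter_index - step) (number_index + step)] else acc
    let acc := if !(letter_index - step < 0 || number_index - step < 0) then
                 acc ++ [pvSq (letter_index - step) (number_index - step)] else acc
    let acc := if !(letter_index + step > 7 || number_index + step > 7) then
                 acc ++ [pvSq (letter_index + step) (number_index + step)] else acc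
    let acc := if !(letter_index + step > 7 || number_index - step < 0) then
                 acc ++ [pvSq (letter_index + step) (number_index - step)] else acc
    (acc, step + 1)) ([], 1)).1

def check_if_on_diag (start_pos : String) (end_pos : String) : Bool :=
  (PySem.Str.pyGet? start_pos 0).elim false fun c0 =>           -- IndexError, excluded by Pre_
  (PySem.Str.pyGet? start_pos 1).elim false fun c1 =>           -- IndexError, excluded by Pre_
  (PySem.List.index? pvLetters c0).elim false fun letter_index =>   -- ValueError, excluded by Pre_
  (PySem.List.index? pvNumbers c1).elim false fun number_index =>   -- ValueError, excluded by Pre_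
  (pvDiag letter_index number_index).contains end_pos.toList

-- ===== PORT B =====
-- B's own copies of the module constants letters_position / number_position
def pvLettersB : List Char := ['a', 'b', 'c', 'd', 'e', 'f', 'g', 'h']
def pvNumbersB : List Char := ['1', '2', '3', '4', '5', '6', '7', '8']

def check_if_on_diag_alt (start_pos : String) (end_pos : String) : Bool :=
  match start_pos.toList with
  | c0 :: c1 :: _ =>
    match PySem.List.index? pvLettersB c0, PySem.List.index? pvNumbersB c1 with
    | some li, some ni =>
      -- guard: len(end_pos) == 2 and both characters are board coordinates
      match end_pos.toList with
      | [d0, d1] =>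
        match PySem.List.index? pvLettersB d0, PySem.List.index? pvNumbersB d1 with
        | some le, some ne =>
            ((le : Int) - (li : Int)).natAbs == ((ne : Int) - (ni : Int)).natAbs
              && !(le == li && ne == ni)
        | _, _ => false
      | _ => false
    | _, _ => false  -- ValueError, excluded by Pre_
  | _ => false  -- IndexError, excluded by Pre_

-- ===== PRECONDITION & SPEC =====
-- Pre_: A raises (IndexError/ValueError) unless start_pos has ≥ 2 chars with
-- start_pos[0] in 'a'..'h' and start_pos[1] in '1'..'8'; exactly those inputs are excluded.
def Pre_check_if_on_diag (start_pos : String) (end_pos : String) : Prop :=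
  ((start_pos.toList[0]?.map (['a', 'b', 'c', 'd', 'e', 'f', 'g', 'h'].contains ·)).getD false
    && (start_pos.toList[1]?.map (['1', '2', '3', '4', '5', '6', '7', '8'].contains ·)).getD false) = true

instance (start_pos : String) (end_pos : String) : Decidable (Pre_check_if_on_diag start_pos end_pos) := by
  unfold Pre_check_if_on_diag; infer_instance

def pvWitness_check_if_on_diag : String × String := ("c3", "e5")

def Spec_check_if_on_diag (start_pos : String) (end_pos : String) (out : Bool) : Prop := out = check_if_on_diag_alt start_pos end_pos
instance (start_pos : String) (end_pos : String) (out : Bool) : Decidable (Spec_check_if_on_diag start_pos end_pos out) := by unfold Spec_check_if_on_diag; infer_instance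

-- ===== CLAIM (what is proved, stated in full; the proofs are below) =====
def Claim_equal_check_if_on_diag : Prop := ∀ (start_pos : String) (end_pos : String), Dom_check_if_on_diag start_pos end_pos → Pre_check_if_on_diag start_pos end_pos → Spec_check_if_on_diag start_pos end_pos (check_if_on_diag start_pos end_pos)

-- ===== LEMMAS AND PROOFS =====

-- membership of a board square in A's diagonal list agrees with B's closed-form test (4096 cases)
lemma pvDiag_contains_sq (li ni lj nj : Fin 8) :
    (pvDiag li.val ni.val).contains (pvSq lj.val nj.val)
      = (((lj.val : Int) - (li.val : Int)).natAbs == ((nj.val : Int) - (ni.val : Int)).natAbs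
          && !(lj.val == li.val && nj.val == ni.val)) := by
  revert li ni lj nj; decide

-- every element of A's diagonal list is a board square
lemma pvDiag_all_sq (li ni : Fin 8) :
    (pvDiag li.val ni.val).all (fun x => decide (∃ lj nj : Fin 8, x = pvSq lj.val nj.val)) = true := by
  revert li ni; decide

lemma pvLetter_mem (lj : Fin 8) : PySem.List.pyGetD pvLetters (lj.val : Int) ' ' ∈ pvLetters := by
  revert lj; decide

lemma pvNumber_mem (nj : Fin 8) : PySem.List.pyGetD pvNumbers (nj.val : Int) ' ' ∈ pvNumbers := by
  revert nj; decide

lemma pvDiag_not_mem (li ni : Fin 8) (x : List Char)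
    (h : ∀ lj nj : Fin 8, x ≠ pvSq lj.val nj.val) :
    (pvDiag li.val ni.val).contains x = false := by
  rw [Bool.eq_false_iff]
  intro hc
  have hx : x ∈ pvDiag li.val ni.val := by
    simpa using hc
  have := List.all_eq_true.mp (pvDiag_all_sq li ni) x hx
  obtain ⟨lj, nj, hxe⟩ := of_decide_eq_true this
  exact h lj nj hxe

lemma pvIndex_lt {xs : List Char} {c : Char} {k : Nat}
    (h : PySem.List.index? xs c = some k) : k < xs.length ∧ xs[k]? = some c := by
  obtain ⟨hk, hv, _⟩ := PySem.List.getElem_of_index?_eq_some h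
  exact ⟨hk, by simp [hk, hv]⟩

-- ===== VERDICT (by name: the statement is the Claim_ definition above) =====
theorem check_if_on_diag_spec : Claim_equal_check_if_on_diag := by
  intro s e _ hpre
  unfold Pre_check_if_on_diag at hpre
  unfold Spec_check_if_on_diag check_if_on_diag check_if_on_diag_alt
  rcases hs : s.toList with _ | ⟨c0, _ | ⟨c1, rest⟩⟩ <;> rw [hs] at hpre <;> simp at hpre
  obtain ⟨hc0, hc1⟩ := hpre
  -- start indices
  have hc0' : c0 ∈ pvLetters := by simp [pvLetters]; tauto
  have hc1' : c1 ∈ pvNumbers := by simp [pvNumbers]; tauto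
  obtain ⟨li, hli⟩ := Option.isSome_iff_exists.mp ((PySem.List.index?_isSome_iff _ _).mpr hc0')
  obtain ⟨ni, hni⟩ := Option.isSome_iff_exists.mp ((PySem.List.index?_isSome_iff _ _).mpr hc1')
  obtain ⟨hli8, _⟩ := pvIndex_lt hli
  obtain ⟨hni8, _⟩ := pvIndex_lt hni
  have hliB : PySem.List.index? pvLettersB c0 = some li := hli
  have hniB : PySem.List.index? pvNumbersB c1 = some ni := hni
  have hg0 : PySem.Str.pyGet? s 0 = some c0 := by
    simp [hs]
  have hg1 : PySem.Str.pyGet? s 1 = some c1 := by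
    simp [hs]
  simp only [hg0, hg1, hli, hni, hliB, hniB, Option.elim_some]
  rcases he : e.toList with _ | ⟨d0, _ | ⟨d1, _ | ⟨d2, tl⟩⟩⟩
  · exact pvDiag_not_mem ⟨li, hli8⟩ ⟨ni, hni8⟩ [] (by intro lj nj h; simp [pvSq] at h)
  · exact pvDiag_not_mem ⟨li, hli8⟩ ⟨ni, hni8⟩ [d0] (by intro lj nj h; simp [pvSq] at h)
  · -- end_pos has exactly two characters
    dsimp only
    rcases hle : PySem.List.index? pvLettersB d0 with _ | le
    · have hd0 : d0 ∉ pvLetters :=  (PySem.List.index?_eq_none_iff _ _).mp hle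
      cases hne : PySem.List.index? pvNumbersB d1 <;> dsimp only <;>
      · refine pvDiag_not_mem ⟨li, hli8⟩ ⟨ni, hni8⟩ [d0, d1] ?_
        intro lj nj h
        simp only [pvSq, List.cons.injEq, and_true] at h
        exact hd0 (h.1 ▸ pvLetter_mem lj)
    · rcases hne : PySem.List.index? pvNumbersB d1 with _ | ne
      · have hd1 : d1 ∉ pvNumbers := (PySem.List.index?_eq_none_iff _ _).mp hne
        dsimp only
        refine pvDiag_not_mem ⟨li, hli8⟩ ⟨ni, hni8⟩ [d0, d1] ?_
        intro lj nj h
        simp only [pvSq, List.cons.injEq, and_true] at h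
        exact hd1 (h.2 ▸ pvNumber_mem nj)
      · obtain ⟨hle8, hled⟩ := pvIndex_lt hle
        obtain ⟨hne8, hned⟩ := pvIndex_lt hne
        have hled' : pvLetters[le]? = some d0 := hled
        have hned' : pvNumbers[ne]? = some d1 := hned
        have hd0 : PySem.List.pyGetD pvLetters ((le : Nat) : Int) ' ' = d0 := by
          simp [PySem.List.pyGetD_natCast, List.getD_eq_getElem?_getD, hled']
        have hd1 : PySem.List.pyGetD pvNumbers ((ne : Nat) : Int) ' ' = d1 := by
          simp [PySem.List.pyGetD_natCast, List.getD_eq_getElem?_getD, hned']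
        have hsq : [d0, d1] = pvSq le ne := by simp [pvSq, hd0, hd1]
        rw [hsq]
        exact pvDiag_contains_sq ⟨li, hli8⟩ ⟨ni, hni8⟩ ⟨le, hle8⟩ ⟨ne, hne8⟩
  · exact pvDiag_not_mem ⟨li, hli8⟩ ⟨ni, hni8⟩ (d0 :: d1 :: d2 :: tl)
      (by intro lj nj h; simp [pvSq] at h)
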